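-- pv_equiv track=rewrite | github.com/PandaKingKing/MIFEM | big_microfauna/really_bug.py | exist_detect
-- ===== SOURCE A (Python) =====
-- def exist_detect(detection_sequence, interval_frame_number=10, interval_num=5, frame_threshold=6, interval_threshold=3):
--     """
--     真实性检验
--     :param detection_sequence: 检测序列
--     :param interval_frame_number: 小区间长度
--     :param interval_num: 大区间长度
--     :param frame_threshold: 小区间阈值
--     :param interval_threshold: 大区间阈值
--     :return: 是否存在(True: 存在, False: 不存在)
--     """
--     exist = False
--     queue = []
--     for i in range(0, len(detection_sequence), interval_frame_number):
--         frame_number = sum(detection_sequence[i:i + interval_frame_number])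
--         if frame_number >= frame_threshold:
--             queue.append(True)
--         else:
--             queue.append(False)
--         if len(queue) == interval_num:
--             interval_number = sum(queue)
--             if interval_number >= interval_threshold:
--                 exist = True
--                 break
--             queue.pop(0)
--     return exist
-- ===== SOURCE B (Python) =====
-- def exist_detect(detection_sequence, interval_frame_number=10, interval_num=5, frame_threshold=6, interval_threshold=3):
--     if interval_num < 1:
--         return False
--     flags = [sum(detection_sequence[i:i + interval_frame_number]) >= frame_threshold
--              for i in range(0, len(detection_sequence), interval_frame_number)]
--     if len(flags) < interval_num:
--         return False
--     prefix = [0]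
--     for f in flags:
--         prefix.append(prefix[-1] + f)
--     return any(prefix[i + interval_num] - prefix[i] >= interval_threshold
--                for i in range(len(flags) - interval_num + 1))
-- ===== Notes on version B (the rewrite author's own statement) =====
-- stated objective: alternative
-- what changed: Replaces A's single interleaved loop with a popping sliding-window queue and early break by a table-first decomposition: build the full chunk-flag list, then a prefix-sum array over it, and scan every length-interval_num window by prefix-sum difference.
import Mathlib
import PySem

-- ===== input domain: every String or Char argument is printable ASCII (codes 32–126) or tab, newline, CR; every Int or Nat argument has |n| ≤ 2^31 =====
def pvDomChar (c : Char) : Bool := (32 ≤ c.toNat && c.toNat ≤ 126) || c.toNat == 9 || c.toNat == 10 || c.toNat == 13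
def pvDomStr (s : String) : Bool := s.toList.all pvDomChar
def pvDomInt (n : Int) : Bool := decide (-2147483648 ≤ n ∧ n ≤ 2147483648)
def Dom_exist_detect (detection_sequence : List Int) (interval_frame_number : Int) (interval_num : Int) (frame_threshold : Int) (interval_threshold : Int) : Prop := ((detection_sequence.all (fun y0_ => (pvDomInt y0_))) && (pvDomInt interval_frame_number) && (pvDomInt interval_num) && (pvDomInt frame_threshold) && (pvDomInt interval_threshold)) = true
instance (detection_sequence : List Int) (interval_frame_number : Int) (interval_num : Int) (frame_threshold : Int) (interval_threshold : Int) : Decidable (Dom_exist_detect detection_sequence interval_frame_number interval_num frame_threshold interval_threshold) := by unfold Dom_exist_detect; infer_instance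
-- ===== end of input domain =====

-- B replaces A's single interleaved loop (popping sliding-window queue + early break) by a
-- table-first decomposition: chunk-flag list, prefix-sum array, window scan (alternative, same cost).

-- ===== PORT A =====
-- literal transliteration of A's for-loop with the queue and the early break
def exist_detect_loop (ds : List Int) (ifn : Int) (inum : Int) (ft : Int) (it : Int) : List Int → List Bool → Bool
  | [], _queue => false
  | i :: rest, queue =>
    let frame_number := (PySem.List.slice ds (some i) (some (i + ifn))).sum
    let queue1 := if frame_number ≥ ft then queue ++ [true] else queue ++ [false]
    if (queue1.length : Int) = inum then
      let interval_number := (queue1.map (fun b => if b then (1 : Int) else 0)).sum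
      if interval_number ≥ it then true
      else exist_detect_loop ds ifn inum ft it rest (queue1.drop 1)
    else exist_detect_loop ds ifn inum ft it rest queue1

def exist_detect (detection_sequence : List Int) (interval_frame_number : Int) (interval_num : Int) (frame_threshold : Int) (interval_threshold : Int) : Bool :=
  exist_detect_loop detection_sequence interval_frame_number interval_num frame_threshold interval_threshold
    (PySem.List.pyRange 0 (detection_sequence.length : Int) interval_frame_number) []

-- ===== PORT B =====
-- prefix = [0]; for f in flags: prefix.append(prefix[-1] + f)
def exist_detect_prefixsums (flags : List Bool) : List Int :=
  flags.foldl (fun p f => p ++ [PySem.List.pyGetD p (-1) 0 + (if f then (1 : Int) else 0)]) [0]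

def exist_detect_alt (detection_sequence : List Int) (interval_frame_number : Int) (interval_num : Int) (frame_threshold : Int) (interval_threshold : Int) : Bool :=
  if interval_num < 1 then false
  else
    let flags := (PySem.List.pyRange 0 (detection_sequence.length : Int) interval_frame_number).map
      (fun i => decide ((PySem.List.slice detection_sequence (some i) (some (i + interval_frame_number))).sum ≥ frame_threshold))
    if (flags.length : Int) < interval_num then false
    else
      let pref := exist_detect_prefixsums flags
      (PySem.List.pyRange 0 ((flags.length : Int) - interval_num + 1) 1).any
        (fun i => decide (PySem.List.pyGetD pref (i + interval_num) 0 - PySem.List.pyGetD pref i 0 ≥ interval_threshold))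

-- ===== PRECONDITION & SPEC =====
-- Pre_ excludes exactly interval_frame_number = 0, where Python's range(0, n, 0) raises ValueError in both A and B.
def Pre_exist_detect (detection_sequence : List Int) (interval_frame_number : Int) (interval_num : Int) (frame_threshold : Int) (interval_threshold : Int) : Prop :=
  interval_frame_number ≠ 0

instance (detection_sequence : List Int) (interval_frame_number : Int) (interval_num : Int) (frame_threshold : Int) (interval_threshold : Int) : Decidable (Pre_exist_detect detection_sequence interval_frame_number interval_num frame_threshold interval_threshold) := by unfold Pre_exist_detect; infer_instance

def pvWitness_exist_detect : List Int × Int × Int × Int × Int := ([1, 0, 2, 1], 2, 2, 1, 2)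

def Spec_exist_detect (detection_sequence : List Int) (interval_frame_number : Int) (interval_num : Int) (frame_threshold : Int) (interval_threshold : Int) (out : Bool) : Prop := out = exist_detect_alt detection_sequence interval_frame_number interval_num frame_threshold interval_threshold
instance (detection_sequence : List Int) (interval_frame_number : Int) (interval_num : Int) (frame_threshold : Int) (interval_threshold : Int) (out : Bool) : Decidable (Spec_exist_detect detection_sequence interval_frame_number interval_num frame_threshold interval_threshold out) := by unfold Spec_exist_detect; infer_instance

-- ===== CLAIM (what is proved, stated in full; the proofs are below) =====
def Claim_equal_exist_detect : Prop := ∀ (detection_sequence : List Int) (interval_frame_number : Int) (interval_num : Int) (frame_threshold : Int) (interval_threshold : Int), Dom_exist_detect detection_sequence interval_frame_number interval_num frame_threshold interval_threshold → Pre_exist_detect detection_sequence interval_frame_number interval_num frame_threshold interval_threshold → Spec_exist_detect detection_sequence interval_frame_number interval_num frame_threshold interval_threshold (exist_detect detection_sequence interval_frame_number interval_num frame_threshold interval_threshold)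

-- ===== LEMMAS AND PROOFS =====

-- number of `true`s in a flag window, as an Int
def pvCnt (l : List Bool) : Int := (l.countP (fun b => b) : Int)

-- A's loop abstracted over the precomputed flag list
def pvLoopF (inum : Int) (it : Int) : List Bool → List Bool → Bool
  | [], _queue => false
  | f :: rest, queue =>
    let queue1 := queue ++ [f]
    if (queue1.length : Int) = inum then
      if pvCnt queue1 ≥ it then true
      else pvLoopF inum it rest (queue1.drop 1)
    else pvLoopF inum it rest queue1

lemma pvCnt_eq_sum (l : List Bool) :
    (l.map (fun b => if b then (1 : Int) else 0)).sum = pvCnt l := by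
  simp [pvCnt, PySem.List.sum_map_ite_one_zero]

-- A's loop equals the abstract loop over the mapped flags
lemma exist_detect_loop_eq (ds : List Int) (ifn inum ft it : Int) :
    ∀ (idxs : List Int) (q : List Bool),
      exist_detect_loop ds ifn inum ft it idxs q =
      pvLoopF inum it (idxs.map (fun i => decide ((PySem.List.slice ds (some i) (some (i + ifn))).sum ≥ ft))) q := by
  intro idxs
  induction idxs with
  | nil => intro q; rfl
  | cons i rest ih =>
    intro q
    simp only [exist_detect_loop, pvLoopF, List.map_cons, pvCnt_eq_sum]
    by_cases h : (PySem.List.slice ds (some i) (some (i + ifn))).sum ≥ ft <;>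
      simp [h, ih]

-- inum ≤ 0: the length test never fires and the loop returns false
lemma pvLoopF_nonpos (inum it : Int) (h : inum ≤ 0) :
    ∀ (F q : List Bool), pvLoopF inum it F q = false := by
  intro F
  induction F with
  | nil => intro q; rfl
  | cons f rest ih =>
    intro q
    have hne : ¬((q.length : Int) + 1 = inum) := by omega
    simp [pvLoopF, hne, ih]

-- the key characterisation: A's queue loop is a window-existence test
lemma pvLoopF_char (k : Nat) (_hk : 1 ≤ k) (it : Int) :
    ∀ (F q : List Bool), q.length < k →
      (pvLoopF (k : Int) it F q = true ↔
      ∃ j : Nat, q.length < j ∧ j ≤ q.length + F.length ∧ k ≤ j ∧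
        it ≤ pvCnt (((q ++ F).drop (j - k)).take k)) := by
  intro F
  induction F with
  | nil =>
    intro q hq
    simp only [pvLoopF, List.length_nil, Nat.add_zero, Bool.false_eq_true, false_iff]
    rintro ⟨j, h1, h2, -, -⟩
    omega
  | cons f rest ih =>
    intro q hq
    by_cases h1 : q.length + 1 = k
    · have hcond : (((q ++ [f]).length : Int) = (k : Int)) := by
        simp only [List.length_append, List.length_singleton]; exact_mod_cast h1
      by_cases h2 : pvCnt (q ++ [f]) ≥ it
      · simp only [pvLoopF, hcond, if_pos, h2, true_iff]
        refine ⟨k, by omega, by simp; omega, le_refl k, ?_⟩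
        have hw : ((q ++ f :: rest).drop (k - k)).take k = q ++ [f] := by
          rw [Nat.sub_self, List.drop_zero, show q ++ f :: rest = (q ++ [f]) ++ rest by simp,
            List.take_left' (by simp [h1])]
        rw [hw]; exact h2
      · have hlen : ((q ++ [f]).drop 1).length < k := by simp; omega
        simp only [pvLoopF, hcond, h2, ite_false, if_pos]
        rw [ih _ hlen]
        have hd : ((q ++ [f]).drop 1).length = q.length := by simp
        have hsplit : (q ++ [f]).drop 1 ++ rest = ((q ++ [f]) ++ rest).drop 1 :=
          (List.drop_append_of_le_length (by simp)).symm
        have hqfr : q ++ f :: rest = (q ++ [f]) ++ rest := by simp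
        constructor
        · rintro ⟨j', hj1, hj2, hj3, hj4⟩
          rw [hd] at hj1 hj2
          refine ⟨j' + 1, by omega, by simp only [List.length_cons]; omega, by omega, ?_⟩
          have heq : ((q ++ f :: rest).drop (j' + 1 - k)) = (((q ++ [f]).drop 1 ++ rest).drop (j' - k)) := by
            rw [hsplit, List.drop_drop, hqfr]
            congr 1
            omega
          rw [heq]; exact hj4
        · rintro ⟨j, hj1, hj2, hj3, hj4⟩
          simp only [List.length_cons] at hj2
          have hjne : j ≠ q.length + 1 := by
            intro hje
            apply h2
            have hw : ((q ++ f :: rest).drop (j - k)).take k = q ++ [f] := by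
              rw [show j - k = 0 by omega, List.drop_zero, hqfr,
                List.take_left' (by simp [h1])]
            rw [hw] at hj4; exact hj4
          refine ⟨j - 1, by rw [hd]; omega, by rw [hd]; omega, by omega, ?_⟩
          have heq : (((q ++ [f]).drop 1 ++ rest).drop (j - 1 - k)) = ((q ++ f :: rest).drop (j - k)) := by
            rw [hsplit, List.drop_drop, hqfr]
            congr 1
            omega
          rw [heq]; exact hj4
    · have hcond : ¬(((q ++ [f]).length : Int) = (k : Int)) := by
        simp only [List.length_append, List.length_singleton]
        intro hc; exact h1 (by exact_mod_cast hc)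
      have hlen : (q ++ [f]).length < k := by simp; omega
      simp only [pvLoopF, hcond, if_false]
      rw [ih _ hlen]
      have hd : (q ++ [f]).length = q.length + 1 := by simp
      have hqfr : q ++ f :: rest = (q ++ [f]) ++ rest := by simp
      constructor
      · rintro ⟨j, hj1, hj2, hj3, hj4⟩
        rw [hd] at hj1 hj2
        refine ⟨j, by omega, by simp only [List.length_cons]; omega, hj3, ?_⟩
        rw [hqfr]; exact hj4
      · rintro ⟨j, hj1, hj2, hj3, hj4⟩
        simp only [List.length_cons] at hj2
        refine ⟨j, by rw [hd]; omega, by rw [hd]; omega, hj3, ?_⟩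
        rw [← hqfr]; exact hj4

-- characterisation of B's prefix list
def pvPsums (s : Int) : List Bool → List Int
  | [] => []
  | f :: fs => (s + (if f then 1 else 0)) :: pvPsums (s + (if f then 1 else 0)) fs

lemma pvPrefix_foldl (F : List Bool) :
    ∀ (p : List Int) (h : p ≠ []),
      F.foldl (fun p f => p ++ [PySem.List.pyGetD p (-1) 0 + (if f then (1 : Int) else 0)]) p =
      p ++ pvPsums (p.getLast h) F := by
  induction F with
  | nil => intro p h; simp [pvPsums]
  | cons f fs ih =>
    intro p h
    simp only [List.foldl_cons, pvPsums]
    rw [ih (p ++ [PySem.List.pyGetD p (-1) 0 + (if f then (1 : Int) else 0)]) (by simp)]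
    rw [PySem.List.pyGetD_neg_one p 0 h]
    simp [List.getLast_append]

lemma pvPsums_getD (F : List Bool) :
    ∀ (s : Int) (j : Nat), j < F.length →
      (pvPsums s F).getD j 0 = s + pvCnt (F.take (j + 1)) := by
  induction F with
  | nil => intro s j hj; simp at hj
  | cons f fs ih =>
    intro s j hj
    cases j with
    | zero => cases f <;> simp [pvPsums, pvCnt]
    | succ j' =>
      simp only [pvPsums, List.getD_cons_succ, List.take_succ_cons]
      rw [ih _ j' (by simpa using hj)]
      cases f <;> simp [pvCnt, List.countP_cons] <;> omega

lemma pvPrefix_getD (F : List Bool) (j : Nat) (hj : j ≤ F.length) :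
    (exist_detect_prefixsums F).getD j 0 = pvCnt (F.take j) := by
  unfold exist_detect_prefixsums
  rw [pvPrefix_foldl F [0] (by simp)]
  cases j with
  | zero => simp [pvCnt]
  | succ j' =>
    simp only [List.getLast_singleton, List.singleton_append, List.getD_cons_succ]
    rw [pvPsums_getD F 0 j' (by omega)]
    simp

-- window count as prefix difference
lemma pvCnt_window (F : List Bool) (m k : Nat) :
    pvCnt (F.take (m + k)) - pvCnt (F.take m) = pvCnt ((F.drop m).take k) := by
  rw [List.take_add]
  simp only [pvCnt, List.countP_append]
  push_cast
  ring

-- B's window scan as a window-existence test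
lemma exist_detect_alt_char (ds : List Int) (ifn inum ft it : Int)
    (hnum : 1 ≤ inum)
    (F : List Bool)
    (hF : F = (PySem.List.pyRange 0 (ds.length : Int) ifn).map
      (fun i => decide ((PySem.List.slice ds (some i) (some (i + ifn))).sum ≥ ft)))
    (hL : ¬ F.length < inum.toNat) :
    (exist_detect_alt ds ifn inum ft it = true ↔
      ∃ m : Nat, m < F.length - inum.toNat + 1 ∧
        it ≤ pvCnt ((F.drop m).take inum.toNat)) := by
  set k := inum.toNat with hkdef
  have hki : ((k : Nat) : Int) = inum := by omega
  have hguard : ¬ ((F.length : Int) < inum) := by omega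
  simp only [exist_detect_alt, if_neg (show ¬ inum < 1 by omega), ← hF, if_neg hguard]
  rw [PySem.List.pyRange_one, List.any_map, List.any_eq_true]
  have hN : (((F.length : Int) - inum + 1) - 0).toNat = F.length - k + 1 := by omega
  constructor
  · rintro ⟨m, hm, hp⟩
    rw [List.mem_range, hN] at hm
    refine ⟨m, hm, ?_⟩
    simp only [Function.comp, decide_eq_true_iff] at hp
    have h1 : PySem.List.pyGetD (exist_detect_prefixsums F) (0 + (m : Int) + inum) 0 = pvCnt (F.take (m + k)) := by
      rw [show (0 : Int) + (m : Int) + inum = ((m + k : Nat) : Int) by omega,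
        PySem.List.pyGetD_natCast, pvPrefix_getD F (m + k) (by omega)]
    have h2 : PySem.List.pyGetD (exist_detect_prefixsums F) (0 + (m : Int)) 0 = pvCnt (F.take m) := by
      rw [show (0 : Int) + (m : Int) = ((m : Nat) : Int) by omega,
        PySem.List.pyGetD_natCast, pvPrefix_getD F m (by omega)]
    rw [h1, h2, pvCnt_window] at hp
    exact hp
  · rintro ⟨m, hm, hp⟩
    refine ⟨m, by rw [List.mem_range, hN]; omega, ?_⟩
    simp only [Function.comp, decide_eq_true_iff]
    rw [show (0 : Int) + (m : Int) + inum = ((m + k : Nat) : Int) by omega,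
      show (0 : Int) + (m : Int) = ((m : Nat) : Int) by omega,
      PySem.List.pyGetD_natCast, PySem.List.pyGetD_natCast,
      pvPrefix_getD F (m + k) (by omega), pvPrefix_getD F m (by omega), pvCnt_window]
    exact hp

-- ===== VERDICT (by name: the statement is the Claim_ definition above) =====
theorem exist_detect_spec : Claim_equal_exist_detect := by
  intro ds ifn inum ft it _hdom _hpre
  show exist_detect ds ifn inum ft it = exist_detect_alt ds ifn inum ft it
  by_cases hnum : inum < 1
  · rw [exist_detect, exist_detect_loop_eq, pvLoopF_nonpos inum it (by omega),
      exist_detect_alt, if_pos hnum]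
  · rw [not_lt] at hnum
    set k := inum.toNat with hkdef
    have hk1 : 1 ≤ k := by omega
    have hki : ((k : Nat) : Int) = inum := by omega
    set F := (PySem.List.pyRange 0 (ds.length : Int) ifn).map
      (fun i => decide ((PySem.List.slice ds (some i) (some (i + ifn))).sum ≥ ft)) with hF
    have hA : exist_detect ds ifn inum ft it = pvLoopF inum it F [] := by
      rw [exist_detect, exist_detect_loop_eq]
    by_cases hL : F.length < k
    · have hAf : exist_detect ds ifn inum ft it = false := by
        rw [hA, ← hki]
        rcases Bool.eq_false_or_eq_true (pvLoopF ((k : Nat) : Int) it F []) with h | h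
        · exfalso
          rcases (pvLoopF_char k hk1 it F [] (by simpa using hk1)).mp h with ⟨j, _, hj2, hj3, _⟩
          simp at hj2
          omega
        · exact h
      have hBf : exist_detect_alt ds ifn inum ft it = false := by
        simp only [exist_detect_alt, if_neg (show ¬ inum < 1 by omega), ← hF]
        rw [if_pos (by omega)]
      rw [hAf, hBf]
    · have key : (exist_detect ds ifn inum ft it = true) ↔ (exist_detect_alt ds ifn inum ft it = true) := by
        rw [hA, ← hki, pvLoopF_char k hk1 it F [] (by simpa using hk1),
          exist_detect_alt_char ds ifn ((k : Nat) : Int) ft it (by omega) F hF (by simpa using hL)]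
        simp only [List.length_nil, List.nil_append, Nat.zero_add]
        constructor
        · rintro ⟨j, hj1, hj2, hj3, hj4⟩
          exact ⟨j - k, by omega, hj4⟩
        · rintro ⟨m, hm, hmp⟩
          refine ⟨m + k, by omega, by omega, by omega, ?_⟩
          rw [show m + k - k = m by omega]
          exact hmp
      exact Bool.eq_iff_iff.mpr key
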